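-- pv_equiv track=rewrite | github.com/ChoneungSon/BeakJoon | A형보충문제/자동완성_손초능.py | find
-- ===== SOURCE A (Python) =====
-- def find(s1, s2):
--     cnt, i = 0, 0
--     while 1:
--         cnt += 1
--         if i == s1.__len__(): return cnt-1, cnt
--         elif i == s2.__len__(): return cnt, cnt-1
--         else:
--             if s1[i] != s2[i]: return cnt, cnt
--         i += 1
-- ===== SOURCE B (Python) =====
-- def find(s1, s2):
--     # Binary search for L, the length of the longest common prefix:
--     # prefix equality is monotone in k, so whole-slice comparisons suffice.
--     lo, hi = 0, min(len(s1), len(s2))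
--     while lo < hi:
--         mid = (lo + hi + 1) // 2
--         if s1[:mid] == s2[:mid]:
--             lo = mid
--         else:
--             hi = mid - 1
--     L = lo
--     if L == len(s1):
--         return L, L + 1
--     if L == len(s2):
--         return L + 1, L
--     return L + 1, L + 1
-- ===== Notes on version B (the rewrite author's own statement) =====
-- stated objective: alternative
-- what changed: Replaces A's linear character-by-character while loop with a binary search on the common-prefix length using whole-slice comparisons (prefix equality is monotone in the length), then a closed-form three-way case on the lengths.
import Mathlib
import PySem

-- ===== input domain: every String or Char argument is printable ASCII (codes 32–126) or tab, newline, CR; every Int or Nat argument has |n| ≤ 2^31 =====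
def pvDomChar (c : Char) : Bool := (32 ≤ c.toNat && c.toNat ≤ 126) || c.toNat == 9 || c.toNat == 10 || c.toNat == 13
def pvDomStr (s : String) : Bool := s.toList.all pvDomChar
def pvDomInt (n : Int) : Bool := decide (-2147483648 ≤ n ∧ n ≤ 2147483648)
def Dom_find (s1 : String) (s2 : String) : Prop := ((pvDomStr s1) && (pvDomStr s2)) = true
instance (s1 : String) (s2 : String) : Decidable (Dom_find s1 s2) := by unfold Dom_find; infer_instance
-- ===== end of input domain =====

-- B replaces A's linear scan with a binary search on the common-prefix length
-- (slice comparisons) plus a closed-form case split on the lengths; not faster, alternative.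

-- ===== PORT A =====
-- A's `while 1` loop with index i and counter cnt; advancing i over both strings
-- is transcribed as structural recursion on the two character lists (i == len(s) ↔ list exhausted).
def findLoopA : List Char → List Char → Int → Int × Int
  | l1, l2, cnt =>
    let cnt := cnt + 1
    match l1, l2 with
    | [], _ => (cnt - 1, cnt)
    | _, [] => (cnt, cnt - 1)
    | c1 :: t1, c2 :: t2 =>
      if c1 ≠ c2 then (cnt, cnt) else findLoopA t1 t2 cnt

def find (s1 : String) (s2 : String) : Int × Int :=
  findLoopA s1.toList s2.toList 0

-- ===== PORT B =====
-- Source B's while-loop binary search on (lo, hi); the Python slice s1[:mid] with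
-- 0 ≤ mid is exactly List.take mid on the character list.
def bsearchB (l1 l2 : List Char) (lo hi : Nat) : Nat :=
  if _h : lo < hi then
    let mid := (lo + hi + 1) / 2
    if l1.take mid = l2.take mid then bsearchB l1 l2 mid hi
    else bsearchB l1 l2 lo (mid - 1)
  else lo
termination_by hi - lo
decreasing_by all_goals omega

def find_alt (s1 : String) (s2 : String) : Int × Int :=
  let l1 := s1.toList
  let l2 := s2.toList
  let L := bsearchB l1 l2 0 (min l1.length l2.length)
  if L = l1.length then ((L : Int), (L : Int) + 1)
  else if L = l2.length then ((L : Int) + 1, (L : Int))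
  else ((L : Int) + 1, (L : Int) + 1)

-- ===== PRECONDITION & SPEC =====
def Spec_find (s1 : String) (s2 : String) (out : Int × Int) : Prop := out = find_alt s1 s2
instance (s1 : String) (s2 : String) (out : Int × Int) : Decidable (Spec_find s1 s2 out) := by unfold Spec_find; infer_instance

-- ===== CLAIM (what is proved, stated in full; the proofs are below) =====
def Claim_equal_find : Prop := ∀ (s1 : String) (s2 : String), Dom_find s1 s2 → Spec_find s1 s2 (find s1 s2)

-- ===== LEMMAS AND PROOFS =====
-- length of the longest common prefix: the yardstick both ports are compared against
def lcpLen : List Char → List Char → Nat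
  | a :: t1, b :: t2 => if a = b then lcpLen t1 t2 + 1 else 0
  | _, _ => 0

theorem lcpLen_le (l1 l2 : List Char) : lcpLen l1 l2 ≤ min l1.length l2.length := by
  induction l1 generalizing l2 with
  | nil => simp [lcpLen]
  | cons a t1 ih =>
    cases l2 with
    | nil => simp [lcpLen]
    | cons b t2 =>
      by_cases h : a = b
      · have := ih t2; simp [lcpLen, h]; omega
      · simp [lcpLen, h]

theorem take_eq_iff (l1 l2 : List Char) : ∀ k, k ≤ l1.length → k ≤ l2.length →
    (l1.take k = l2.take k ↔ k ≤ lcpLen l1 l2) := by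
  induction l1 generalizing l2 with
  | nil =>
    intro k hk _
    have : k = 0 := by simpa using hk
    subst this; simp
  | cons a t1 ih =>
    intro k hk1 hk2
    cases k with
    | zero => simp
    | succ k =>
      cases l2 with
      | nil => simp at hk2
      | cons b t2 =>
        simp only [List.take_succ_cons, List.cons.injEq, lcpLen]
        by_cases h : a = b
        · subst h
          rw [ih t2 k (by simpa using hk1) (by simpa using hk2)]
          simp
        · simp [h]

theorem bsearchB_eq (l1 l2 : List Char) : ∀ lo hi, lo ≤ lcpLen l1 l2 → lcpLen l1 l2 ≤ hi →
    hi ≤ min l1.length l2.length → bsearchB l1 l2 lo hi = lcpLen l1 l2 := by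
  intro lo hi
  induction hlh : hi - lo using Nat.strong_induction_on generalizing lo hi with
  | _ n ih =>
    intro hlo hhi hmin
    unfold bsearchB
    by_cases h : lo < hi
    · simp only [h, dif_pos]
      have hmid1 : lo < (lo + hi + 1) / 2 := by omega
      have hmid2 : (lo + hi + 1) / 2 ≤ hi := by omega
      have hiff := take_eq_iff l1 l2 ((lo + hi + 1) / 2) (by omega) (by omega)
      by_cases ht : l1.take ((lo + hi + 1) / 2) = l2.take ((lo + hi + 1) / 2)
      · have hle : (lo + hi + 1) / 2 ≤ lcpLen l1 l2 := hiff.mp ht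
        rw [if_pos ht]
        exact ih (hi - (lo + hi + 1) / 2) (by omega) _ _ rfl hle hhi hmin
      · have hgt : ¬ ((lo + hi + 1) / 2 ≤ lcpLen l1 l2) := fun hc => ht (hiff.mpr hc)
        rw [if_neg ht]
        exact ih (((lo + hi + 1) / 2 - 1) - lo) (by omega) _ _ rfl hlo (by omega) (by omega)
    · rw [dif_neg h]; omega

theorem findLoopA_eq (l1 l2 : List Char) : ∀ (cnt : Int),
    findLoopA l1 l2 cnt =
      (let L : Int := (lcpLen l1 l2 : Nat)
       if lcpLen l1 l2 = l1.length then (cnt + L, cnt + L + 1)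
       else if lcpLen l1 l2 = l2.length then (cnt + L + 1, cnt + L)
       else (cnt + L + 1, cnt + L + 1)) := by
  induction l1 generalizing l2 with
  | nil => intro cnt; simp [findLoopA, lcpLen]
  | cons c1 t1 ih =>
    intro cnt
    cases l2 with
    | nil =>
      simp [findLoopA, lcpLen]
    | cons c2 t2 =>
      by_cases h : c1 = c2
      · subst h
        rw [show findLoopA (c1 :: t1) (c1 :: t2) cnt = findLoopA t1 t2 (cnt + 1) by
          simp [findLoopA]]
        rw [ih t2 (cnt + 1)]
        simp only [lcpLen, List.length_cons]
        split_ifs <;> simp [Prod.ext_iff] <;> omega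
      · have hl : lcpLen (c1 :: t1) (c2 :: t2) = 0 := by simp [lcpLen, h]
        simp [findLoopA, h, hl]

-- ===== VERDICT (by name: the statement is the Claim_ definition above) =====
theorem find_spec : Claim_equal_find := by
  intro s1 s2 _
  have hb := bsearchB_eq s1.toList s2.toList 0 (min s1.toList.length s2.toList.length)
    (Nat.zero_le _) (lcpLen_le _ _) le_rfl
  unfold Spec_find find find_alt
  rw [findLoopA_eq]
  simp only [hb]
  split_ifs <;> simp
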